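-- pv_equiv track=rewrite | github.com/andrewpaige1/cookit-backend | assistant.py | generate_shopping_list
-- ===== SOURCE A (Python) =====
-- from typing import List, Dict, Optional, Any, Union
--
-- def generate_shopping_list(ingredients: List[str], servings: Optional[int] = None) -> Dict[str, List[str]]:
--     """Organize ingredients into shopping categories"""
--     categories = {
--         "Produce": [],
--         "Meat & Seafood": [],
--         "Dairy & Eggs": [],
--         "Pantry & Dry Goods": [],
--         "Frozen": [],
--         "Other": []
--     }
--
--     # Categorization keywords
--     produce_keywords = ["onion", "garlic", "tomato", "bell pepper", "carrot", "celery", "lettuce", "spinach", "herb", "lemon", "lime", "ginger", "mushroom", "potato", "apple", "avocado"]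
--     meat_keywords = ["chicken", "beef", "pork", "fish", "salmon", "shrimp", "turkey", "bacon", "sausage"]
--     dairy_keywords = ["milk", "cheese", "butter", "cream", "yogurt", "egg", "sour cream"]
--     pantry_keywords = ["oil", "vinegar", "salt", "pepper", "flour", "sugar", "rice", "pasta", "sauce", "broth", "stock", "spice", "vanilla"]
--     frozen_keywords = ["frozen", "ice"]
--
--     for ingredient in ingredients:
--         ingredient_lower = ingredient.lower()
--         categorized = False
--
--         for keyword in produce_keywords:
--             if keyword in ingredient_lower:
--                 categories["Produce"].append(ingredient)
--                 categorized = True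
--                 break
--
--         if not categorized:
--             for keyword in meat_keywords:
--                 if keyword in ingredient_lower:
--                     categories["Meat & Seafood"].append(ingredient)
--                     categorized = True
--                     break
--
--         if not categorized:
--             for keyword in dairy_keywords:
--                 if keyword in ingredient_lower:
--                     categories["Dairy & Eggs"].append(ingredient)
--                     categorized = True
--                     break
--
--         if not categorized:
--             for keyword in frozen_keywords:
--                 if keyword in ingredient_lower:
--                     categories["Frozen"].append(ingredient)
--                     categorized = True
--                     break
--
--         if not categorized:
--             for keyword in pantry_keywords:
--                 if keyword in ingredient_lower:
--                     categories["Pantry & Dry Goods"].append(ingredient)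
--                     categorized = True
--                     break
--
--         if not categorized:
--             categories["Other"].append(ingredient)
--
--     # Remove empty categories
--     return {cat: items for cat, items in categories.items() if items}
-- ===== SOURCE B (Python) =====
-- from typing import List, Dict, Optional
--
-- # Table-driven rewrite: one (category, keywords) table in matching-priority order,
-- # a single classifier, and per-category filters in display order.
-- _TABLE = [
--     ("Produce", ["onion", "garlic", "tomato", "bell pepper", "carrot", "celery", "lettuce", "spinach", "herb", "lemon", "lime", "ginger", "mushroom", "potato", "apple", "avocado"]),
--     ("Meat & Seafood", ["chicken", "beef", "pork", "fish", "salmon", "shrimp", "turkey", "bacon", "sausage"]),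
--     ("Dairy & Eggs", ["milk", "cheese", "butter", "cream", "yogurt", "egg", "sour cream"]),
--     ("Frozen", ["frozen", "ice"]),
--     ("Pantry & Dry Goods", ["oil", "vinegar", "salt", "pepper", "flour", "sugar", "rice", "pasta", "sauce", "broth", "stock", "spice", "vanilla"]),
-- ]
--
-- _DISPLAY_ORDER = ["Produce", "Meat & Seafood", "Dairy & Eggs", "Pantry & Dry Goods", "Frozen", "Other"]
--
-- def _category_of(ingredient: str) -> str:
--     low = ingredient.lower()
--     return next((cat for cat, kws in _TABLE if any(k in low for k in kws)), "Other")
--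
-- def generate_shopping_list(ingredients: List[str], servings: Optional[int] = None) -> Dict[str, List[str]]:
--     labelled = [(_category_of(i), i) for i in ingredients]
--     result = {}
--     for cat in _DISPLAY_ORDER:
--         items = [i for c, i in labelled if c == cat]
--         if items:
--             result[cat] = items
--     return result
-- ===== Notes on version B (the rewrite author's own statement) =====
-- stated objective: simpler
-- what changed: A's six unrolled keyword loops mutating a six-list dict state in one pass are replaced by a (category, keywords) priority table with a single next()-based classifier, the result being built by one per-category filter pass per display category.
import Mathlib
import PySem

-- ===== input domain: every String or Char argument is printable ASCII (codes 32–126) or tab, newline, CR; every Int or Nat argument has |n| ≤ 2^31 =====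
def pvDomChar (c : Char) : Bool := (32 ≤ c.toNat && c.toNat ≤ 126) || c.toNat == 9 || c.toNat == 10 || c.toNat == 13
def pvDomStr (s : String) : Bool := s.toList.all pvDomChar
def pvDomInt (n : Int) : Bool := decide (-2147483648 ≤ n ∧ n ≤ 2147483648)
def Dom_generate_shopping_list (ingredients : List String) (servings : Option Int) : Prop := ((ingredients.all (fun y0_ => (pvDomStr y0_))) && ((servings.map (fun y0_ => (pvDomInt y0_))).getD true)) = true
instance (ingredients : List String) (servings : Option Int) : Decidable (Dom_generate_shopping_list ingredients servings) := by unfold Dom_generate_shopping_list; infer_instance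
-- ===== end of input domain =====

-- B replaces A's six unrolled keyword loops over a mutable six-list state with one
-- (category, keywords) priority table, a single classifier, and per-category filters
-- in display order (objective: simpler).

-- ===== PORT A =====
def pvProduceKw : List String := ["onion", "garlic", "tomato", "bell pepper", "carrot", "celery", "lettuce", "spinach", "herb", "lemon", "lime", "ginger", "mushroom", "potato", "apple", "avocado"]
def pvMeatKw : List String := ["chicken", "beef", "pork", "fish", "salmon", "shrimp", "turkey", "bacon", "sausage"]
def pvDairyKw : List String := ["milk", "cheese", "butter", "cream", "yogurt", "egg", "sour cream"]
def pvPantryKw : List String := ["oil", "vinegar", "salt", "pepper", "flour", "sugar", "rice", "pasta", "sauce", "broth", "stock", "spice", "vanilla"]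
def pvFrozenKw : List String := ["frozen", "ice"]

-- 'for keyword in kws: if keyword in low: append; break' appends iff some keyword matches
def generate_shopping_list (ingredients : List String) (servings : Option Int) : List (String × List String) :=
  let st := ingredients.foldl (fun st ingredient =>
    let low := PySem.Str.lower ingredient
    let (p, m, d, pa, f, o) := st
    if pvProduceKw.any (fun k => PySem.Str.isIn k low) then (p ++ [ingredient], m, d, pa, f, o)
    else if pvMeatKw.any (fun k => PySem.Str.isIn k low) then (p, m ++ [ingredient], d, pa, f, o)
    else if pvDairyKw.any (fun k => PySem.Str.isIn k low) then (p, m, d ++ [ingredient], pa, f, o)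
    else if pvFrozenKw.any (fun k => PySem.Str.isIn k low) then (p, m, d, pa, f ++ [ingredient], o)
    else if pvPantryKw.any (fun k => PySem.Str.isIn k low) then (p, m, d, pa ++ [ingredient], f, o)
    else (p, m, d, pa, f, o ++ [ingredient]))
    (([] : List String), ([] : List String), ([] : List String), ([] : List String), ([] : List String), ([] : List String))
  let (p, m, d, pa, f, o) := st
  ([("Produce", p), ("Meat & Seafood", m), ("Dairy & Eggs", d), ("Pantry & Dry Goods", pa), ("Frozen", f), ("Other", o)]).filter (fun c => !c.2.isEmpty)

-- ===== PORT B =====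
def pvTable : List (String × List String) :=
  [("Produce", pvProduceKw), ("Meat & Seafood", pvMeatKw), ("Dairy & Eggs", pvDairyKw), ("Frozen", pvFrozenKw), ("Pantry & Dry Goods", pvPantryKw)]

def pvDisplayOrder : List String := ["Produce", "Meat & Seafood", "Dairy & Eggs", "Pantry & Dry Goods", "Frozen", "Other"]

def pvCategoryOf (ingredient : String) : String :=
  let low := PySem.Str.lower ingredient
  ((pvTable.find? (fun ckws => ckws.2.any (fun k => PySem.Str.isIn k low))).map Prod.fst).getD "Other"

def generate_shopping_list_alt (ingredients : List String) (servings : Option Int) : List (String × List String) :=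
  let labelled := ingredients.map (fun i => (pvCategoryOf i, i))
  pvDisplayOrder.filterMap (fun cat =>
    let items := (labelled.filter (fun ci => ci.1 == cat)).map Prod.snd
    if items.isEmpty then none else some (cat, items))

-- ===== PRECONDITION & SPEC =====
def Spec_generate_shopping_list (ingredients : List String) (servings : Option Int) (out : List (String × List String)) : Prop := out = generate_shopping_list_alt ingredients servings
instance (ingredients : List String) (servings : Option Int) (out : List (String × List String)) : Decidable (Spec_generate_shopping_list ingredients servings out) := by unfold Spec_generate_shopping_list; infer_instance

-- ===== CLAIM (what is proved, stated in full; the proofs are below) =====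
def Claim_equal_generate_shopping_list : Prop := ∀ (ingredients : List String) (servings : Option Int), Dom_generate_shopping_list ingredients servings → Spec_generate_shopping_list ingredients servings (generate_shopping_list ingredients servings)

-- ===== LEMMAS AND PROOFS =====

-- pvCategoryOf unfolded to the branch cascade of A's matching order
lemma pvCategoryOf_eq (i : String) :
    pvCategoryOf i =
      (if pvProduceKw.any (fun k => PySem.Str.isIn k (PySem.Str.lower i)) then "Produce"
       else if pvMeatKw.any (fun k => PySem.Str.isIn k (PySem.Str.lower i)) then "Meat & Seafood"
       else if pvDairyKw.any (fun k => PySem.Str.isIn k (PySem.Str.lower i)) then "Dairy & Eggs"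
       else if pvFrozenKw.any (fun k => PySem.Str.isIn k (PySem.Str.lower i)) then "Frozen"
       else if pvPantryKw.any (fun k => PySem.Str.isIn k (PySem.Str.lower i)) then "Pantry & Dry Goods"
       else "Other") := by
  simp only [pvCategoryOf, pvTable, List.find?]
  cases h1 : pvProduceKw.any (fun k => PySem.Str.isIn k (PySem.Str.lower i)) <;>
  cases h2 : pvMeatKw.any (fun k => PySem.Str.isIn k (PySem.Str.lower i)) <;>
  cases h3 : pvDairyKw.any (fun k => PySem.Str.isIn k (PySem.Str.lower i)) <;>
  cases h4 : pvFrozenKw.any (fun k => PySem.Str.isIn k (PySem.Str.lower i)) <;>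
  cases h5 : pvPantryKw.any (fun k => PySem.Str.isIn k (PySem.Str.lower i)) <;>
    simp only [h1, h2, h3, h4, h5, Option.map_some, Option.map_none, Option.getD_some,
      Option.getD_none, if_true, if_false, Bool.false_eq_true, ite_true, ite_false]

-- A's fold distributes into six per-category filters
lemma fold_split (l : List String) (p m d pa f o : List String) :
    l.foldl (fun st ingredient =>
      let low := PySem.Str.lower ingredient
      let (p, m, d, pa, f, o) := st
      if pvProduceKw.any (fun k => PySem.Str.isIn k low) then (p ++ [ingredient], m, d, pa, f, o)
      else if pvMeatKw.any (fun k => PySem.Str.isIn k low) then (p, m ++ [ingredient], d, pa, f, o)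
      else if pvDairyKw.any (fun k => PySem.Str.isIn k low) then (p, m, d ++ [ingredient], pa, f, o)
      else if pvFrozenKw.any (fun k => PySem.Str.isIn k low) then (p, m, d, pa, f ++ [ingredient], o)
      else if pvPantryKw.any (fun k => PySem.Str.isIn k low) then (p, m, d, pa ++ [ingredient], f, o)
      else (p, m, d, pa, f, o ++ [ingredient])) (p, m, d, pa, f, o)
    = (p ++ l.filter (fun i => pvCategoryOf i == "Produce"),
       m ++ l.filter (fun i => pvCategoryOf i == "Meat & Seafood"),
       d ++ l.filter (fun i => pvCategoryOf i == "Dairy & Eggs"),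
       pa ++ l.filter (fun i => pvCategoryOf i == "Pantry & Dry Goods"),
       f ++ l.filter (fun i => pvCategoryOf i == "Frozen"),
       o ++ l.filter (fun i => pvCategoryOf i == "Other")) := by
  induction l generalizing p m d pa f o with
  | nil => simp
  | cons x xs ih =>
    simp only [List.foldl_cons, List.filter_cons, pvCategoryOf_eq x]
    cases h1 : pvProduceKw.any (fun k => PySem.Str.isIn k (PySem.Str.lower x)) <;>
    cases h2 : pvMeatKw.any (fun k => PySem.Str.isIn k (PySem.Str.lower x)) <;>
    cases h3 : pvDairyKw.any (fun k => PySem.Str.isIn k (PySem.Str.lower x)) <;>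
    cases h4 : pvFrozenKw.any (fun k => PySem.Str.isIn k (PySem.Str.lower x)) <;>
    cases h5 : pvPantryKw.any (fun k => PySem.Str.isIn k (PySem.Str.lower x)) <;>
      simp only [h1, h2, h3, h4, h5, if_true, if_false, Bool.false_eq_true, ite_true, ite_false] <;>
      rw [ih] <;>
      simp [List.append_assoc]

-- B's labelling pass then per-category selection is the plain per-category filter
lemma items_eq (ingredients : List String) (cat : String) :
    ((ingredients.map (fun i => (pvCategoryOf i, i))).filter (fun ci => ci.1 == cat)).map Prod.snd
      = ingredients.filter (fun i => pvCategoryOf i == cat) := by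
  induction ingredients with
  | nil => rfl
  | cons x xs ih =>
    simp only [List.map_cons, List.filter_cons]
    cases h : pvCategoryOf x == cat <;> simp [h, ih]

-- ===== VERDICT (by name: the statement is the Claim_ definition above) =====
theorem generate_shopping_list_spec : Claim_equal_generate_shopping_list := by
  intro ingredients servings _
  unfold Spec_generate_shopping_list generate_shopping_list generate_shopping_list_alt
  rw [fold_split]
  simp only [List.nil_append, pvDisplayOrder, List.filterMap_cons, List.filterMap_nil,
    List.filter_cons, List.filter_nil, items_eq]
  cases hp : (ingredients.filter (fun i => pvCategoryOf i == "Produce")).isEmpty <;>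
  cases hm : (ingredients.filter (fun i => pvCategoryOf i == "Meat & Seafood")).isEmpty <;>
  cases hd : (ingredients.filter (fun i => pvCategoryOf i == "Dairy & Eggs")).isEmpty <;>
  cases hpa : (ingredients.filter (fun i => pvCategoryOf i == "Pantry & Dry Goods")).isEmpty <;>
  cases hf : (ingredients.filter (fun i => pvCategoryOf i == "Frozen")).isEmpty <;>
  cases ho : (ingredients.filter (fun i => pvCategoryOf i == "Other")).isEmpty <;>
    simp [hp, hm, hd, hpa, hf, ho]
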